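-- pv_equiv track=rewrite | github.com/avilamowski/hyper_jade | ejemplos/ej1-2025-s2-p2-ej2/alu18.py | lista_unica
-- ===== SOURCE A (Python) =====
-- def buscar_pos(lista, palabra):
--     for i in range(len(lista)):
--         if lista[i] == palabra:
--             return i
--     return -1
--
-- def lista_unica(lista1, lista2):
--     lista_unica_1 = []
--     lista_unica_2 = []
--     for i in range(len(lista1)):
--         if lista1[i] not in lista_unica_1:
--             lista_unica_1.append(lista1[i])
--             lista_unica_2.append(lista2[i])
--         else:
--             posicion = buscar_pos(lista_unica_1, lista1[i])
--             lista_unica_2[posicion] += lista2[i]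
--     return lista_unica_1, lista_unica_2
-- ===== SOURCE B (Python) =====
-- def lista_unica(lista1, lista2):
--     claves = list(dict.fromkeys(lista1))
--     sumas = [sum(v for k, v in zip(lista1, lista2) if k == c) for c in claves]
--     return claves, sumas
-- ===== Notes on version B (the rewrite author's own statement) =====
-- stated objective: simpler
-- what changed: Instead of A's single pass that incrementally maintains two positionally-linked lists and rescans with buscar_pos on each duplicate, B is two staged passes: dict.fromkeys gives the ordered unique keys, then a comprehension computes each key's total as one filtered sum over zip(lista1, lista2); nothing is ever updated in place.
import Mathlib
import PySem

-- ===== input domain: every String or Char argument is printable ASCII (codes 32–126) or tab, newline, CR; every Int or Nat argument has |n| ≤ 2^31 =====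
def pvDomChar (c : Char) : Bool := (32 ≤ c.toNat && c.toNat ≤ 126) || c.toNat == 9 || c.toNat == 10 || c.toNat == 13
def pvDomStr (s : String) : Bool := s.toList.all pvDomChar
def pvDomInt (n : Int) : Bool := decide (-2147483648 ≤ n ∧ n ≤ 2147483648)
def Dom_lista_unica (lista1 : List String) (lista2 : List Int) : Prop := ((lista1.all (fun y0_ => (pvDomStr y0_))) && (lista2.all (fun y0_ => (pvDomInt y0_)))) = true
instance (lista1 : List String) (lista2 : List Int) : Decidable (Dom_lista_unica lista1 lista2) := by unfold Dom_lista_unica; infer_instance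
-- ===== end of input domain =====

-- B replaces A's single incremental pass (two positionally-linked lists, buscar_pos rescan
-- and in-place += on duplicates) with two staged passes: ordered unique keys via
-- dict.fromkeys, then one filtered sum over zip(lista1, lista2) per key (objective: simpler).

-- ===== PORT A =====
-- for i in range(len(lista)): if lista[i] == palabra: return i / return -1
def buscar_pos_go (lista : List String) (palabra : String) (i : Int) : Int :=
  match lista with
  | [] => -1
  | x :: xs => if x == palabra then i else buscar_pos_go xs palabra (i + 1)

def buscar_pos (lista : List String) (palabra : String) : Int :=
  buscar_pos_go lista palabra 0

-- the for-i-in-range(len(lista1)) loop of A, as index recursion over the same state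
def lista_unica_go (lista1 : List String) (lista2 : List Int) (i : Nat)
    (u1 : List String) (u2 : List Int) : List String × List Int :=
  if h : i < lista1.length then
    if ¬ u1.contains lista1[i] then
      lista_unica_go lista1 lista2 (i + 1) (u1 ++ [lista1[i]])
        (u2 ++ [PySem.List.pyGetD lista2 (i : Int) 0])
    else
      let posicion := buscar_pos u1 lista1[i]
      lista_unica_go lista1 lista2 (i + 1) u1
        (PySem.List.pySetD u2 posicion
          (PySem.List.pyGetD u2 posicion 0 + PySem.List.pyGetD lista2 (i : Int) 0))
  else (u1, u2)
termination_by lista1.length - i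

def lista_unica (lista1 : List String) (lista2 : List Int) : List String × List Int :=
  lista_unica_go lista1 lista2 0 [] []

-- ===== PORT B =====
-- claves = list(dict.fromkeys(lista1))
-- sumas = [sum(v for k, v in zip(lista1, lista2) if k == c) for c in claves]
def lista_unica_alt (lista1 : List String) (lista2 : List Int) : List String × List Int :=
  let claves := PySem.List.dedup lista1
  let sumas := claves.map (fun c =>
    (lista1.zip lista2).foldl (fun s kv => if kv.1 == c then s + kv.2 else s) 0)
  (claves, sumas)

-- ===== PRECONDITION & SPEC =====
-- Pre_ excludes exactly the inputs where A raises IndexError: when len(lista1) > len(lista2)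
-- the loop reaches i = len(lista2) and lista2[i] raises.
def Pre_lista_unica (lista1 : List String) (lista2 : List Int) : Prop :=
  lista1.length ≤ lista2.length
instance (lista1 : List String) (lista2 : List Int) : Decidable (Pre_lista_unica lista1 lista2) := by
  unfold Pre_lista_unica; infer_instance

def pvWitness_lista_unica : List String × List Int := (["a", "b", "a"], [1, 2, 3])

def Spec_lista_unica (lista1 : List String) (lista2 : List Int) (out : List String × List Int) : Prop := out = lista_unica_alt lista1 lista2
instance (lista1 : List String) (lista2 : List Int) (out : List String × List Int) : Decidable (Spec_lista_unica lista1 lista2 out) := by unfold Spec_lista_unica; infer_instance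

-- ===== CLAIM (what is proved, stated in full; the proofs are below) =====
def Claim_equal_lista_unica : Prop := ∀ (lista1 : List String) (lista2 : List Int), Dom_lista_unica lista1 lista2 → Pre_lista_unica lista1 lista2 → Spec_lista_unica lista1 lista2 (lista_unica lista1 lista2)

-- ===== LEMMAS AND PROOFS =====

-- B's per-key filtered sum, abstracted over the pair list
def ksum (p : List (String × Int)) (c : String) : Int :=
  p.foldl (fun s kv => if kv.1 == c then s + kv.2 else s) 0

-- B's ordered unique keys of a pair list
def kkeys (p : List (String × Int)) : List String :=
  PySem.Set.ofList (p.map Prod.fst)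

lemma ksum_snoc (p : List (String × Int)) (q : String × Int) (c : String) :
    ksum (p ++ [q]) c = if q.1 == c then ksum p c + q.2 else ksum p c := by
  simp only [ksum, List.foldl_append, List.foldl_cons, List.foldl_nil]

lemma ksum_zero (c : String) :
    ∀ p : List (String × Int), c ∉ p.map Prod.fst → ksum p c = 0 := by
  intro p
  induction p with
  | nil => intro _; rfl
  | cons q rest ih =>
    intro h
    simp only [List.map_cons, List.mem_cons, not_or] at h
    have hq : q.1 ≠ c := fun hh => h.1 hh.symm
    simpa [ksum, hq] using ih h.2

lemma kkeys_snoc (p : List (String × Int)) (q : String × Int) :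
    kkeys (p ++ [q]) = PySem.Set.add (kkeys p) q.1 := by
  simp [kkeys, PySem.Set.ofList_append_singleton]

-- buscar_pos finds the first index (Python's list scan = List.idxOf) when the word is present
lemma buscar_pos_go_mem (k : String) :
    ∀ (l : List String) (j : Int), k ∈ l → buscar_pos_go l k j = j + (List.idxOf k l : Int) := by
  intro l
  induction l with
  | nil => intro j hj; cases hj
  | cons x xs ih =>
    intro j hj
    by_cases hx : x == k
    · simp [buscar_pos_go, hx, List.idxOf_cons]
    · have hk : k ∈ xs := by
        rcases List.mem_cons.mp hj with h | h
        · exact absurd (by simp [h]) hx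
        · exact h
      have hxf : (x == k) = false := Bool.eq_false_iff.mpr hx
      simp only [buscar_pos_go, hxf, List.idxOf_cons, ih (j + 1) hk, cond_false, if_false,
        Bool.false_eq_true]
      push_cast
      ring

lemma buscar_pos_mem (l : List String) (k : String) (h : k ∈ l) :
    buscar_pos l k = (List.idxOf k l : Int) := by
  simpa using buscar_pos_go_mem k l 0 h

-- pointwise bump of g at a present key, as a set at its first index
lemma map_update (g : String → Int) (k : String) (v : Int) :
    ∀ ks : List String, ks.Nodup → k ∈ ks →
      ks.map (fun c => if k == c then g c + v else g c)
        = (ks.map g).set (List.idxOf k ks) (g k + v) := by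
  intro ks
  induction ks with
  | nil => intro _ hm; cases hm
  | cons x rest ih =>
    intro hnd hm
    by_cases hx : k = x
    · subst hx
      have hk : k ∉ rest := (List.nodup_cons.mp hnd).1
      simp only [List.map_cons, List.idxOf_cons, beq_self_eq_true, cond_true,
        List.set_cons_zero]
      congr 1
      apply List.map_congr_left
      intro c hc
      have : ¬ (k == c) = true := by
        simp only [beq_iff_eq]
        intro hh; exact hk (hh ▸ hc)
      simp [this]
    · have hkf : (k == x) = false := by simpa using hx
      have hxf : (x == k) = false := by simpa using Ne.symm hx
      have hk : k ∈ rest := by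
        rcases List.mem_cons.mp hm with h | h
        · exact absurd h hx
        · exact h
      simp only [List.map_cons, List.idxOf_cons, hkf, hxf, cond_false, Bool.false_eq_true,
        if_false, List.set_cons_succ]
      rw [ih (List.nodup_cons.mp hnd).2 hk]

lemma map_getD_idxOf (g : String → Int) (ks : List String) (k : String) (hk : k ∈ ks) :
    (ks.map g).getD (List.idxOf k ks) 0 = g k := by
  have hlt : List.idxOf k ks < ks.length := List.idxOf_lt_length_of_mem hk
  rw [List.getD_eq_getElem _ _ (by simpa using hlt)]
  simp [List.getElem_idxOf]

-- the A loop from index i over B's staged state = B's final staged result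
lemma go_eq_staged (l1 : List String) (l2 : List Int) (hlen : l1.length ≤ l2.length) :
    ∀ (n i : Nat), l1.length - i = n →
      lista_unica_go l1 l2 i (kkeys ((l1.zip l2).take i))
          ((kkeys ((l1.zip l2).take i)).map (ksum ((l1.zip l2).take i)))
        = (kkeys (l1.zip l2), (kkeys (l1.zip l2)).map (ksum (l1.zip l2))) := by
  intro n
  induction n with
  | zero =>
    intro i hn
    have hi : ¬ i < l1.length := by omega
    have htake : ((l1.zip l2).take i) = l1.zip l2 := by
      apply List.take_of_length_le
      simp only [List.length_zip]
      omega
    rw [lista_unica_go, dif_neg hi, htake]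
  | succ n ih =>
    intro i hn
    have hi : i < l1.length := by omega
    have hi2 : i < l2.length := by omega
    have hiz : i < (l1.zip l2).length := by simp only [List.length_zip]; omega
    set p := (l1.zip l2).take i with hp
    have htake : ((l1.zip l2).take (i + 1)) = p ++ [(l1[i], l2[i])] := by
      rw [hp, List.take_add_one, List.getElem?_eq_getElem hiz, List.getElem_zip]
      rfl
    have hv : PySem.List.pyGetD l2 (i : Int) 0 = l2[i] := by
      rw [PySem.List.pyGetD_natCast, List.getD_eq_getElem l2 0 hi2]
    have hnd : (kkeys p).Nodup := PySem.Set.nodup_ofList _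
    rw [lista_unica_go, dif_pos hi]
    by_cases hc : l1[i] ∈ kkeys p
    · -- duplicate key: A updates in place at buscar_pos; staged sums absorb it via ksum_snoc
      have hcl : (kkeys p).contains l1[i] = true := List.contains_iff_mem.mpr hc
      rw [if_neg (not_not_intro hcl)]
      have hadd : PySem.Set.add (kkeys p) l1[i] = kkeys p := by
        simp [PySem.Set.add, PySem.Set.contains, hc]
      have hkeys : kkeys (p ++ [(l1[i], l2[i])]) = kkeys p := by
        rw [kkeys_snoc]; exact hadd
      have hvals : (PySem.List.pySetD ((kkeys p).map (ksum p)) (buscar_pos (kkeys p) l1[i])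
            (PySem.List.pyGetD ((kkeys p).map (ksum p)) (buscar_pos (kkeys p) l1[i]) 0
              + PySem.List.pyGetD l2 (i : Int) 0))
          = (kkeys p).map (ksum (p ++ [(l1[i], l2[i])])) := by
        rw [buscar_pos_mem _ _ hc, PySem.List.pySetD_natCast, PySem.List.pyGetD_natCast,
          hv, map_getD_idxOf (ksum p) (kkeys p) l1[i] hc,
          ← map_update (ksum p) l1[i] l2[i] (kkeys p) hnd hc]
        apply List.map_congr_left
        intro c _
        rw [ksum_snoc]
      rw [show (lista_unica_go l1 l2 (i + 1) (kkeys p)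
            (PySem.List.pySetD ((kkeys p).map (ksum p)) (buscar_pos (kkeys p) l1[i])
              (PySem.List.pyGetD ((kkeys p).map (ksum p)) (buscar_pos (kkeys p) l1[i]) 0
                + PySem.List.pyGetD l2 (i : Int) 0)))
          = lista_unica_go l1 l2 (i + 1) (kkeys ((l1.zip l2).take (i + 1)))
              ((kkeys ((l1.zip l2).take (i + 1))).map (ksum ((l1.zip l2).take (i + 1)))) from by
        rw [htake, hkeys, hvals]]
      exact ih (i + 1) (by omega)
    · -- new key: A appends to both lists; staged result appends the key with sum = its value
      have hcl : (kkeys p).contains l1[i] = false :=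
        Bool.eq_false_iff.mpr (fun ht => hc (List.contains_iff_mem.mp ht))
      rw [if_pos (by simpa using hc)]
      have hkeys : kkeys (p ++ [(l1[i], l2[i])]) = kkeys p ++ [l1[i]] := by
        rw [kkeys_snoc]
        simp [PySem.Set.add, PySem.Set.contains, hc]
      have hnotp : l1[i] ∉ p.map Prod.fst := fun hm =>
        hc ((PySem.Set.mem_ofList _ _).mpr hm)
      have hvals : (kkeys p).map (ksum p) ++ [PySem.List.pyGetD l2 (i : Int) 0]
          = (kkeys p ++ [l1[i]]).map (ksum (p ++ [(l1[i], l2[i])])) := by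
        rw [List.map_append, List.map_singleton]
        congr 1
        · apply List.map_congr_left
          intro c hcm
          rw [ksum_snoc]
          have : (l1[i] == c) = false := by
            simp only [beq_eq_false_iff_ne, ne_eq]
            intro hh; exact hc (hh ▸ hcm)
          simp [this]
        · rw [ksum_snoc]
          simp [hv, ksum_zero _ p hnotp]
      rw [show (lista_unica_go l1 l2 (i + 1) (kkeys p ++ [l1[i]])
            ((kkeys p).map (ksum p) ++ [PySem.List.pyGetD l2 (i : Int) 0]))
          = lista_unica_go l1 l2 (i + 1) (kkeys ((l1.zip l2).take (i + 1)))
              ((kkeys ((l1.zip l2).take (i + 1))).map (ksum ((l1.zip l2).take (i + 1)))) from by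
        rw [htake, hvals, hkeys]]
      exact ih (i + 1) (by omega)

-- ===== VERDICT (by name: the statement is the Claim_ definition above) =====
theorem lista_unica_spec : Claim_equal_lista_unica := by
  intro lista1 lista2 _ hpre
  unfold Spec_lista_unica lista_unica lista_unica_alt
  have h := go_eq_staged lista1 lista2 hpre lista1.length 0 rfl
  have hz : (lista1.zip lista2).map Prod.fst = lista1 := List.map_fst_zip hpre
  unfold kkeys at h
  rw [hz] at h
  simp only [PySem.List.dedup_eq_ofList]
  exact h
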